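-- pv_equiv track=rewrite | github.com/gdavis1361/iota | scripts/verify_docs.py | extract_doc_links
-- ===== SOURCE A (Python) =====
-- from typing import List, Tuple
--
-- def extract_doc_links(content: str) -> List[Tuple[str, int]]:
--     """Extract markdown links and their line numbers from content.
--
--     Returns:
--         List of tuples containing (link, line_number)
--     """
--     links = []
--     for line_num, line in enumerate(content.split("\n"), 1):
--         start = 0
--         while True:
--             # Find next markdown link
--             link_start = line.find("](", start)
--             if link_start == -1:
--                 break
--
--             link_end = line.find(")", link_start)
--             if link_end == -1:
--                 break
--
--             # Extract link URL
--             link = line[link_start + 2 : link_end]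
--             if not link.startswith(("http://", "https://", "#")):
--                 links.append((link, line_num))
--
--             start = link_end + 1
--
--     return links
-- ===== SOURCE B (Python) =====
-- from typing import List, Tuple
--
-- def extract_doc_links(content: str) -> List[Tuple[str, int]]:
--     """Extract markdown links and their line numbers from content.
--
--     Returns:
--         List of tuples containing (link, line_number)
--     """
--     links = []
--     for line_num, line in enumerate(content.split("\n"), 1):
--         # Split the line at every ')': each piece except the last one is
--         # followed by a ')', so a piece containing '](' yields one link.
--         for piece in line.split(")")[:-1]:
--             pos = piece.find("](")
--             if pos != -1:
--                 link = piece[pos + 2 :]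
--                 if not link.startswith(("http://", "https://", "#")):
--                     links.append((link, line_num))
--     return links
-- ===== Notes on version B (the rewrite author's own statement) =====
-- stated objective: simpler
-- what changed: A's manual index-advancing while-loop (find '](' then find ')' then resume after it) is replaced by splitting each line at ')' and reading at most one link off each piece except the last, which removes the loop state entirely.
import Mathlib
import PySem

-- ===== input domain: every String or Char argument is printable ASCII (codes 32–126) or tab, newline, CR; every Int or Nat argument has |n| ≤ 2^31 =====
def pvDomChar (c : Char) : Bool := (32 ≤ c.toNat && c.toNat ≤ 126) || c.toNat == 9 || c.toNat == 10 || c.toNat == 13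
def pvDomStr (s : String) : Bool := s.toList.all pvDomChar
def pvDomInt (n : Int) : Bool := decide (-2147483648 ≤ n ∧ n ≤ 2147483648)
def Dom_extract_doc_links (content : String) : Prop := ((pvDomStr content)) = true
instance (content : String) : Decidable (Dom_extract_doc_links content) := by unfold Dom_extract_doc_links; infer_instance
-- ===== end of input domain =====

-- B replaces A's index-advancing while-loop (find "](", find ")", resume after ")") by splitting
-- each line at ')' and reading one link off each piece; same return value, no speed claim.

-- ===== PORT A =====
-- (the two lemmas below are cited by pvLineA's decreasing_by; they are not part of the claim)
lemma pv_findFrom_start_le (s sub : List Char) (k : Nat)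
    (h : PySem.Chars.findFrom s sub (k : Int) none ≠ -1) : k ≤ s.length := by
  by_contra hk
  apply h
  have h1 : ¬ ((k : Int) < 0) := by omega
  have h2 : ((s.length : Int) < (k : Int)) := by exact_mod_cast Nat.lt_of_not_le hk
  simp [PySem.Chars.findFrom, h1, h2]

lemma pv_lineA_dec (line : List Char) (start : Nat)
    (h1 : PySem.Chars.findFrom line [']', '('] (start : Int) ≠ -1)
    (h2 : PySem.Chars.findFrom line [')'] (PySem.Chars.findFrom line [']', '('] (start : Int)) ≠ -1) :
    line.length - (PySem.Chars.findFrom line [')'] (PySem.Chars.findFrom line [']', '('] (start : Int)) + 1).toNat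
      < line.length - start := by
  have hk : start ≤ line.length := pv_findFrom_start_le _ _ _ h1
  obtain ⟨hs1, hs2, -⟩ := PySem.Chars.findFrom_natCast_spec line [']', '('] start hk h1
  set a := PySem.Chars.findFrom line [']', '('] (start : Int) with ha
  have h0a : 0 ≤ a := le_trans (Int.natCast_nonneg start) hs1
  have haN : a = ((a.toNat : Nat) : Int) := (Int.toNat_of_nonneg h0a).symm
  have hlenA : a.toNat < line.length := by
    have := hs2.length_le
    simp [List.length_drop] at this
    omega
  rw [haN] at h2 ⊢
  obtain ⟨ht1, ht2, -⟩ := PySem.Chars.findFrom_natCast_spec line [')'] a.toNat (le_of_lt hlenA) h2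
  set b := PySem.Chars.findFrom line [')'] ((a.toNat : Nat) : Int) with hb
  have hltb : b.toNat < line.length := by
    have := ht2.length_le
    simp [List.length_drop] at this
    omega
  have h0b : 0 ≤ b := le_trans (Int.natCast_nonneg _) ht1
  omega

-- A's inner `while True:` loop, one call per line; `start` is A's loop variable
def pvLineA (line : List Char) (num : Int) (start : Nat) : List (String × Int) :=
  let ls := PySem.Chars.findFrom line [']', '('] (start : Int)
  if h1 : ls = -1 then []
  else
    let le := PySem.Chars.findFrom line [')'] ls
    if h2 : le = -1 then []
    else
      let link := PySem.List.slice line (some (ls + 2)) (some le)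
      (if PySem.Chars.startswith link "http://".toList
          || PySem.Chars.startswith link "https://".toList
          || PySem.Chars.startswith link "#".toList then []
       else [(String.ofList link, num)]) ++ pvLineA line num (le + 1).toNat
termination_by line.length - start
decreasing_by
  exact pv_lineA_dec line start h1 h2

def extract_doc_links (content : String) : List (String × Int) :=
  (PySem.List.enumerate (PySem.Chars.splitOn content.toList ['\n']) 1).foldl
    (fun links p => links ++ pvLineA p.2 p.1 0) []

-- ===== PORT B =====
-- body of B's `for piece in line.split(")")[:-1]:`
def pvSegB (piece : List Char) (num : Int) : List (String × Int) :=
  let pos := PySem.Chars.find piece [']', '(']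
  if pos = -1 then []
  else
    let link := PySem.List.slice piece (some (pos + 2)) none
    if PySem.Chars.startswith link "http://".toList
        || PySem.Chars.startswith link "https://".toList
        || PySem.Chars.startswith link "#".toList then []
    else [(String.ofList link, num)]

def extract_doc_links_alt (content : String) : List (String × Int) :=
  (PySem.List.enumerate (PySem.Chars.splitOn content.toList ['\n']) 1).foldl
    (fun links p =>
      (PySem.List.slice (PySem.Chars.splitOn p.2 [')']) none (some (-1))).foldl
        (fun links piece => links ++ pvSegB piece p.1) links) []

-- ===== PRECONDITION & SPEC =====
def Spec_extract_doc_links (content : String) (out : List (String × Int)) : Prop := out = extract_doc_links_alt content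
instance (content : String) (out : List (String × Int)) : Decidable (Spec_extract_doc_links content out) := by unfold Spec_extract_doc_links; infer_instance

-- ===== CLAIM (what is proved, stated in full; the proofs are below) =====
def Claim_equal_extract_doc_links : Prop := ∀ (content : String), Dom_extract_doc_links content → Spec_extract_doc_links content (extract_doc_links content)

-- ===== LEMMAS AND PROOFS =====

-- reference form of Python's str.split(sep) for a one-character separator
def pvSplitC (c : Char) : List Char → List (List Char)
  | [] => [[]]
  | a :: rest => if a = c then [] :: pvSplitC c rest else (pvSplitC c rest).modifyHead (a :: ·)

lemma pvSplitC_ne_nil (c : Char) (l : List Char) : pvSplitC c l ≠ [] := by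
  induction l with
  | nil => simp [pvSplitC]
  | cons a rest ih =>
    simp only [pvSplitC]
    split
    · simp
    · cases h : pvSplitC c rest with
      | nil => exact absurd h ih
      | cons x xs => simp

lemma pvSplitOn_go (c : Char) (l : List Char) :
    ∀ (fuel : Nat) (cur : List Char) (acc : List (List Char)), l.length < fuel →
      PySem.Chars.splitOn.go [c] fuel l cur acc =
        acc.reverse ++ (pvSplitC c l).modifyHead (cur.reverse ++ ·) := by
  induction l with
  | nil =>
    intro fuel cur acc h
    cases fuel with
    | zero => omega
    | succ f => simp [PySem.Chars.splitOn.go, pvSplitC]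
  | cons a rest ih =>
    intro fuel cur acc h
    cases fuel with
    | zero => omega
    | succ f =>
      simp only [PySem.Chars.splitOn.go]
      by_cases hac : a = c
      · subst hac
        rw [if_pos (by simp [List.isPrefixOf])]
        simp only [List.length_cons, List.length_nil, Nat.zero_add, List.drop_succ_cons, List.drop_zero]
        rw [ih f [] (cur.reverse :: acc) (by simp at h; omega)]
        simp only [pvSplitC, List.reverse_nil, List.nil_append,
          List.reverse_cons, List.append_assoc, List.singleton_append]
        congr 1
        cases pvSplitC a rest <;> simp
      · rw [if_neg (by simp [List.isPrefixOf]; exact fun hh => absurd hh.symm hac)]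
        rw [ih f (a :: cur) acc (by simp at h; omega)]
        simp only [pvSplitC, if_neg hac]
        congr 1
        cases hsp : pvSplitC c rest with
        | nil => exact absurd hsp (pvSplitC_ne_nil c rest)
        | cons x xs => simp

lemma pvSplitOn_eq (c : Char) (l : List Char) :
    PySem.Chars.splitOn l [c] = pvSplitC c l := by
  rw [PySem.Chars.splitOn, pvSplitOn_go c l (l.length + 1) [] [] (by omega)]
  cases h : pvSplitC c l with
  | nil => exact absurd h (pvSplitC_ne_nil c l)
  | cons x xs => simp

lemma pvSplitC_no_sep (c : Char) (l : List Char) (h : c ∉ l) : pvSplitC c l = [l] := by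
  induction l with
  | nil => simp [pvSplitC]
  | cons a rest ih =>
    simp only [pvSplitC]
    rw [if_neg (by rintro rfl; exact h (by simp))]
    rw [ih (fun hm => h (by simp [hm]))]
    simp

lemma pvSplitC_append (c : Char) (p r : List Char) (h : c ∉ p) :
    pvSplitC c (p ++ c :: r) = p :: pvSplitC c r := by
  induction p with
  | nil => simp [pvSplitC]
  | cons a t ih =>
    simp only [List.cons_append, pvSplitC]
    rw [if_neg (by rintro rfl; exact h (by simp))]
    rw [ih (fun hm => h (by simp [hm]))]
    simp

lemma pv_prefix_drop_single (c : Char) (s : List Char) (j : Nat) :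
    [c] <+: s.drop j ↔ s[j]? = some c := by
  constructor
  · rintro ⟨t, ht⟩
    have : (s.drop j)[0]? = some c := by rw [← ht]; rfl
    simpa [List.getElem?_drop] using this
  · intro h
    have hj : j < s.length := by
      by_contra hh
      rw [List.getElem?_eq_none (by omega)] at h
      simp at h
    rw [List.drop_eq_getElem_cons hj]
    have e0 : s[j] = c := by simpa [List.getElem?_eq_getElem hj] using h
    rw [e0]
    exact ⟨s.drop (j+1), rfl⟩

lemma pv_prefix_drop_pair (x y : Char) (s : List Char) (j : Nat) :
    [x, y] <+: s.drop j ↔ s[j]? = some x ∧ s[j+1]? = some y := by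
  constructor
  · rintro ⟨t, ht⟩
    have h0 : (s.drop j)[0]? = some x := by rw [← ht]; rfl
    have h1 : (s.drop j)[1]? = some y := by rw [← ht]; rfl
    rw [List.getElem?_drop] at h0 h1
    constructor
    · simpa using h0
    · simpa using h1
  · rintro ⟨h0, h1⟩
    have hj1 : j + 1 < s.length := by
      by_contra hh
      rw [List.getElem?_eq_none (by omega)] at h1
      simp at h1
    have hj : j < s.length := by omega
    rw [List.drop_eq_getElem_cons hj, List.drop_eq_getElem_cons hj1]
    have e0 : s[j] = x := by simpa [List.getElem?_eq_getElem hj] using h0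
    have e1 : s[j+1] = y := by simpa [List.getElem?_eq_getElem hj1] using h1
    rw [e0, e1]
    exact ⟨s.drop (j+2), rfl⟩

lemma pv_find_eq_of_min (s sub : List Char) (m : Nat)
    (h : sub <+: s.drop m) (hmin : ∀ j < m, ¬ sub <+: s.drop j) :
    PySem.Chars.find s sub = (m : Int) := by
  have hinf : sub <:+: s :=
    (PySem.Chars.isIn_iff_infix _ _).mp ((PySem.Chars.exists_prefix_drop_iff_isIn _ _).mp ⟨m, h⟩)
  have h0 : 0 ≤ PySem.Chars.find s sub := (PySem.Chars.find_nonneg_iff _ _).mpr hinf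
  obtain ⟨hp, hmin'⟩ := PySem.Chars.find_spec h0
  rcases Nat.lt_trichotomy (PySem.Chars.find s sub).toNat m with hlt | heq | hgt
  · exact absurd hp (hmin _ hlt)
  · omega
  · exact absurd h (hmin' m hgt)

lemma pv_find_eq_neg_one (s sub : List Char)
    (h : ∀ j, ¬ sub <+: s.drop j) : PySem.Chars.find s sub = -1 := by
  rw [PySem.Chars.find_eq_neg_one_iff]
  intro hinf
  obtain ⟨j, hj⟩ := (PySem.Chars.exists_prefix_drop_iff_isIn _ _).mpr
    ((PySem.Chars.isIn_iff_infix _ _).mpr hinf)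
  exact h j hj


lemma pv_find_single_cons (a c : Char) (u : List Char) (h : a ≠ c) :
    PySem.Chars.find (a :: u) [c] =
      if PySem.Chars.find u [c] = -1 then -1 else 1 + PySem.Chars.find u [c] := by
  split
  · rename_i hu
    apply pv_find_eq_neg_one
    intro j hj
    rw [pv_prefix_drop_single] at hj
    cases j with
    | zero => simp at hj; exact h hj
    | succ k =>
      simp only [List.getElem?_cons_succ] at hj
      have : [c] <+: u.drop k := (pv_prefix_drop_single c u k).mpr hj
      have : PySem.Chars.find u [c] ≠ -1 := by
        rw [PySem.Chars.find_ne_neg_one_iff]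
        exact (PySem.Chars.isIn_iff_infix _ _).mp
          ((PySem.Chars.exists_prefix_drop_iff_isIn _ _).mp ⟨k, this⟩)
      exact this hu
  · rename_i hu
    have h0 : 0 ≤ PySem.Chars.find u [c] := by
      have := PySem.Chars.neg_one_le_find u [c]
      omega
    obtain ⟨hp, hmin⟩ := PySem.Chars.find_spec h0
    have := pv_find_eq_of_min (a :: u) [c] ((PySem.Chars.find u [c]).toNat + 1)
      (by rw [pv_prefix_drop_single]
          simp only [List.getElem?_cons_succ]
          exact (pv_prefix_drop_single c u _).mp hp)
      (by intro j hj
          rw [pv_prefix_drop_single]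
          cases j with
          | zero => simpa using fun hh => h hh
          | succ k =>
            simp only [List.getElem?_cons_succ]
            intro hk
            exact hmin k (by omega) ((pv_prefix_drop_single c u k).mpr hk))
    rw [this]
    omega

-- proof-side reference scan: what A's loop computes on the still-unscanned suffix of a line
lemma pv_scan_dec (cs : List Char)
    (h1 : PySem.Chars.find cs [']', '('] ≠ -1)
    (h2 : PySem.Chars.find (cs.drop ((PySem.Chars.find cs [']', '(']).toNat + 2)) [')'] ≠ -1) :
    ((cs.drop ((PySem.Chars.find cs [']', '(']).toNat + 2)).drop
        ((PySem.Chars.find (cs.drop ((PySem.Chars.find cs [']', '(']).toNat + 2)) [')']).toNat + 1)).length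
      < cs.length := by
  have h0 : 0 ≤ PySem.Chars.find cs [']', '('] := by
    have := PySem.Chars.neg_one_le_find cs [']', '(']
    omega
  obtain ⟨hp, -⟩ := PySem.Chars.find_spec h0
  have hlen : (PySem.Chars.find cs [']', '(']).toNat + 2 ≤ cs.length := by
    have := hp.length_le
    simp [List.length_drop] at this
    omega
  simp [List.length_drop]
  omega

def pvScan (num : Int) (cs : List Char) : List (String × Int) :=
  if h1 : PySem.Chars.find cs [']', '('] = -1 then []
  else
    let u := cs.drop ((PySem.Chars.find cs [']', '(']).toNat + 2)
    if h2 : PySem.Chars.find u [')'] = -1 then []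
    else
      let link := u.take (PySem.Chars.find u [')']).toNat
      (if PySem.Chars.startswith link "http://".toList
          || PySem.Chars.startswith link "https://".toList
          || PySem.Chars.startswith link "#".toList then []
       else [(String.ofList link, num)]) ++ pvScan num (u.drop ((PySem.Chars.find u [')']).toNat + 1))
termination_by cs.length
decreasing_by
  exact pv_scan_dec cs h1 h2

lemma pvLineA_eq_scan (line : List Char) (num : Int) :
    ∀ (n : Nat) (start : Nat), line.length - start ≤ n →
      pvLineA line num start = pvScan num (line.drop start) := by
  intro n
  induction n with
  | zero =>
    intro start hle
    have hsl : line.length ≤ start := by omega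
    have hdrop : line.drop start = [] := List.drop_eq_nil_of_le hsl
    have hA : PySem.Chars.findFrom line [']', '('] (start : Int) = -1 := by
      by_contra h
      have h1 := pv_findFrom_start_le _ _ _ h
      rw [PySem.Chars.findFrom_natCast line [']', '('] start h1, hdrop] at h
      have hnil : PySem.Chars.find ([] : List Char) [']', '('] = -1 := by decide
      simp [hnil] at h
    rw [pvLineA, dif_pos hA, hdrop, pvScan, dif_pos (by decide)]
  | succ n ih =>
    intro start hle
    by_cases hA : PySem.Chars.findFrom line [']', '('] (start : Int) = -1
    · rw [pvLineA, dif_pos hA]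
      by_cases hsl : start ≤ line.length
      · rw [PySem.Chars.findFrom_natCast line [']', '('] start hsl] at hA
        have hfd : PySem.Chars.find (line.drop start) [']', '('] = -1 := by
          by_contra h
          rw [if_neg h] at hA
          have := PySem.Chars.neg_one_le_find (line.drop start) [']', '(']
          omega
        rw [pvScan, dif_pos hfd]
      · rw [List.drop_eq_nil_of_le (by omega), pvScan, dif_pos (by decide)]
    · have hsl := pv_findFrom_start_le _ _ _ hA
      set d := line.drop start with hd
      have hfd : PySem.Chars.find d [']', '('] ≠ -1 := by
        intro h
        rw [PySem.Chars.findFrom_natCast line [']', '('] start hsl, ← hd, if_pos h] at hA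
        exact hA rfl
      have h0i : 0 ≤ PySem.Chars.find d [']', '('] := by
        have := PySem.Chars.neg_one_le_find d [']', '(']
        omega
      set i := (PySem.Chars.find d [']', '(']).toNat with hidef
      have hi : PySem.Chars.find d [']', '('] = (i : Int) := (Int.toNat_of_nonneg h0i).symm
      have hFF : PySem.Chars.findFrom line [']', '('] (start : Int) = ((start + i : Nat) : Int) := by
        rw [PySem.Chars.findFrom_natCast line [']', '('] start hsl, ← hd, if_neg hfd, hi]
        push_cast
        ring
      obtain ⟨hp, hminA⟩ := PySem.Chars.find_spec h0i
      rw [← hidef] at hp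
      have hi2 : i + 2 ≤ d.length := by
        have := hp.length_le
        simp [List.length_drop] at this
        omega
      have hdd : ∀ k : Nat, line.drop (start + k) = d.drop k := by
        intro k
        rw [hd, List.drop_drop, Nat.add_comm]
      have hu : d.drop i = ']' :: '(' :: d.drop (i + 2) := by
        obtain ⟨t, ht⟩ := hp
        have htt : t = d.drop (i + 2) := by
          have := congrArg (List.drop 2) ht
          simpa [List.drop_drop, Nat.add_comm] using this
        rw [← ht, htt]
        rfl
      set u := d.drop (i + 2) with hudef
      have hsil : start + i + 2 ≤ line.length := by
        rw [hd, List.length_drop] at hi2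
        omega
      have hcc : PySem.Chars.find (line.drop (start + i)) [')']
          = if PySem.Chars.find u [')'] = -1 then -1 else 2 + PySem.Chars.find u [')'] := by
        rw [hdd i, hu, pv_find_single_cons _ _ _ (by decide), pv_find_single_cons _ _ _ (by decide)]
        by_cases hj : PySem.Chars.find u [')'] = -1
        · simp [hj]
        · have := PySem.Chars.neg_one_le_find u [')']
          rw [if_neg hj, if_neg (by omega), if_neg hj]
          ring
      by_cases hj : PySem.Chars.find u [')'] = -1
      · have hFF2 : PySem.Chars.findFrom line [')'] ((start + i : Nat) : Int) = -1 := by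
          rw [PySem.Chars.findFrom_natCast line [')'] (start + i) (by omega), hcc, if_pos hj]
          simp
        rw [pvLineA]
        simp only [hFF, hFF2]
        rw [dif_neg (by omega), dif_pos trivial]
        rw [pvScan, dif_neg hfd]
        simp only [hi, Int.toNat_natCast, ← hudef]
        rw [dif_pos hj]
      · have h0j : 0 ≤ PySem.Chars.find u [')'] := by
          have := PySem.Chars.neg_one_le_find u [')']
          omega
        set j := (PySem.Chars.find u [')']).toNat with hjdef
        have hjv : PySem.Chars.find u [')'] = (j : Int) := (Int.toNat_of_nonneg h0j).symm
        have hjlen : j < u.length := by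
          obtain ⟨hq, -⟩ := PySem.Chars.find_spec h0j
          have := hq.length_le
          simp [List.length_drop] at this
          omega
        have hFF2 : PySem.Chars.findFrom line [')'] ((start + i : Nat) : Int)
            = ((start + i + 2 + j : Nat) : Int) := by
          rw [PySem.Chars.findFrom_natCast line [')'] (start + i) (by omega), hcc, if_neg hj, hjv,
            if_neg (by omega : ¬(2 + (j : Int) = -1))]
          push_cast
          ring
        rw [pvLineA]
        simp only [hFF, hFF2]
        rw [dif_neg (by omega), dif_neg (by omega)]
        have hslice : PySem.List.slice line (some (((start + i : Nat) : Int) + 2))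
            (some ((start + i + 2 + j : Nat) : Int)) = u.take j := by
          have hc : (((start + i : Nat) : Int) + 2) = ((start + i + 2 : Nat) : Int) := by push_cast; ring
          rw [hc, PySem.List.slice_natCast,
            show start + i + 2 + j - (start + i + 2) = j from by omega,
            show start + i + 2 = start + (i + 2) from by omega, hdd (i + 2), ← hudef]
        rw [hslice]
        have hrec : ((start + i + 2 + j : Nat) : Int) + 1 = ((start + i + 2 + j + 1 : Nat) : Int) := by
          push_cast
          ring
        rw [hrec, Int.toNat_natCast]
        have hus : u.length = line.length - start - (i + 2) := by
          rw [hudef, hd]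
          simp [List.length_drop]
          omega
        have hjl : start + i + 2 + j + 1 ≤ line.length := by
          have hh : j < line.length - start - (i + 2) := hus ▸ hjlen
          omega
        have hmeas : line.length - (start + i + 2 + j + 1) ≤ n := by omega
        rw [ih (start + i + 2 + j + 1) hmeas,
          show start + i + 2 + j + 1 = start + (i + 2 + j + 1) from by omega, hdd (i + 2 + j + 1)]
        have huu : List.drop (i + 2 + j + 1) d = List.drop (j + 1) u := by
          rw [hudef, hd]
          simp only [List.drop_drop]
          congr 1
          omega
        rw [huu]
        conv_rhs => rw [pvScan]
        rw [dif_neg hfd]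
        simp only [hi, Int.toNat_natCast, ← hudef]
        rw [dif_neg hj]


lemma pv_no_occ (s sub : List Char) (h : PySem.Chars.find s sub = -1) (j : Nat) :
    ¬ sub <+: s.drop j := by
  intro hj
  have hinf : sub <:+: s :=
    (PySem.Chars.isIn_iff_infix _ _).mp ((PySem.Chars.exists_prefix_drop_iff_isIn _ _).mp ⟨j, hj⟩)
  rw [PySem.Chars.find_eq_neg_one_iff] at h
  exact h hinf

lemma pv_split_at_first (c : Char) (l : List Char) (h : c ∈ l) :
    ∃ p r, l = p ++ c :: r ∧ c ∉ p := by
  induction l with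
  | nil => simp at h
  | cons a t ih =>
    by_cases hac : a = c
    · exact ⟨[], t, by simp [hac], by simp⟩
    · have hct : c ∈ t := by
        rcases List.mem_cons.mp h with h1 | h1
        · exact absurd h1.symm hac
        · exact h1
      obtain ⟨p, r, h1, h2⟩ := ih hct
      exact ⟨a :: p, r, by rw [List.cons_append, h1], by
        intro hm
        rcases List.mem_cons.mp hm with hm1 | hm1
        · exact hac hm1.symm
        · exact h2 hm1⟩

lemma pv_drop_shift (p r : List Char) (c : Char) (k : Nat) :
    (p ++ c :: r).drop (p.length + 1 + k) = r.drop k := by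
  rw [List.drop_append, List.drop_eq_nil_of_le (by omega),
    show p.length + 1 + k - p.length = k + 1 from by omega]
  simp

lemma pv_get_shift (p r : List Char) (c : Char) (k : Nat) :
    (p ++ c :: r)[p.length + 1 + k]? = r[k]? := by
  rw [List.getElem?_append_right (by omega),
    show p.length + 1 + k - p.length = k + 1 from by omega]
  simp

lemma pvScan_append (num : Int) (p r : List Char) (hp : (')' : Char) ∉ p) :
    pvScan num (p ++ ')' :: r) = pvSegB p num ++ pvScan num r := by
  by_cases h0 : PySem.Chars.find p [']', '('] = -1
  · have hB : pvSegB p num = [] := by simp [pvSegB, h0]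
    rw [hB, List.nil_append]
    by_cases h1 : PySem.Chars.find r [']', '('] = -1
    · have hs : PySem.Chars.find (p ++ ')' :: r) [']', '('] = -1 := by
        apply pv_find_eq_neg_one
        intro j hj
        obtain ⟨hj1, hj2⟩ := (pv_prefix_drop_pair _ _ _ _).mp hj
        rcases lt_trichotomy j p.length with hlt | heq | hgt
        · rw [List.getElem?_append_left hlt] at hj1
          rcases Nat.lt_or_ge (j + 1) p.length with hlt2 | hge2
          · rw [List.getElem?_append_left hlt2] at hj2
            exact pv_no_occ p [']', '('] h0 j ((pv_prefix_drop_pair _ _ _ _).mpr ⟨hj1, hj2⟩)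
          · have hj1e : j + 1 = p.length := by omega
            rw [hj1e] at hj2
            simp at hj2
        · rw [heq] at hj1
          simp at hj1
        · obtain ⟨k, hk⟩ : ∃ k, j = p.length + 1 + k := ⟨j - p.length - 1, by omega⟩
          rw [hk, pv_get_shift] at hj1
          rw [hk, show p.length + 1 + k + 1 = p.length + 1 + (k + 1) from by omega, pv_get_shift] at hj2
          exact pv_no_occ r [']', '('] h1 k ((pv_prefix_drop_pair _ _ _ _).mpr ⟨hj1, hj2⟩)
      rw [pvScan, dif_pos hs, pvScan, dif_pos h1]
    · have h0i : 0 ≤ PySem.Chars.find r [']', '('] := by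
        have := PySem.Chars.neg_one_le_find r [']', '(']
        omega
      set i1 := (PySem.Chars.find r [']', '(']).toNat with hi1def
      have hi1 : PySem.Chars.find r [']', '('] = (i1 : Int) := (Int.toNat_of_nonneg h0i).symm
      obtain ⟨hq, hqmin⟩ := PySem.Chars.find_spec h0i
      rw [← hi1def] at hq
      obtain ⟨ha, hb⟩ := (pv_prefix_drop_pair _ _ _ _).mp hq
      have hs : PySem.Chars.find (p ++ ')' :: r) [']', '('] = ((p.length + 1 + i1 : Nat) : Int) := by
        apply pv_find_eq_of_min
        · rw [pv_prefix_drop_pair]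
          constructor
          · rw [pv_get_shift]
            exact ha
          · rw [show p.length + 1 + i1 + 1 = p.length + 1 + (i1 + 1) from by omega, pv_get_shift]
            exact hb
        · intro j hj hjj
          obtain ⟨hj1, hj2⟩ := (pv_prefix_drop_pair _ _ _ _).mp hjj
          rcases lt_trichotomy j p.length with hlt | heq | hgt
          · rw [List.getElem?_append_left hlt] at hj1
            rcases Nat.lt_or_ge (j + 1) p.length with hlt2 | hge2
            · rw [List.getElem?_append_left hlt2] at hj2
              exact pv_no_occ p [']', '('] h0 j ((pv_prefix_drop_pair _ _ _ _).mpr ⟨hj1, hj2⟩)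
            · have hj1e : j + 1 = p.length := by omega
              rw [hj1e] at hj2
              simp at hj2
          · rw [heq] at hj1
            simp at hj1
          · obtain ⟨k, hk⟩ : ∃ k, j = p.length + 1 + k := ⟨j - p.length - 1, by omega⟩
            rw [hk, pv_get_shift] at hj1
            rw [hk, show p.length + 1 + k + 1 = p.length + 1 + (k + 1) from by omega, pv_get_shift] at hj2
            exact hqmin k (by omega) ((pv_prefix_drop_pair _ _ _ _).mpr ⟨hj1, hj2⟩)
      have hdrop2 : (p ++ ')' :: r).drop (p.length + 1 + i1 + 2) = r.drop (i1 + 2) := by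
        rw [show p.length + 1 + i1 + 2 = p.length + 1 + (i1 + 2) from by omega, pv_drop_shift]
      conv_lhs => rw [pvScan]
      rw [dif_neg (show ¬PySem.Chars.find (p ++ ')' :: r) [']', '('] = -1 from by
        rw [hs]
        have := Int.natCast_nonneg (p.length + 1 + i1)
        omega)]
      conv_rhs => rw [pvScan]
      rw [dif_neg h1]
      simp only [hs, Int.toNat_natCast, hdrop2, ← hi1def]
  · have h0i : 0 ≤ PySem.Chars.find p [']', '('] := by
      have := PySem.Chars.neg_one_le_find p [']', '(']
      omega
    set i0 := (PySem.Chars.find p [']', '(']).toNat with hi0def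
    have hi0 : PySem.Chars.find p [']', '('] = (i0 : Int) := (Int.toNat_of_nonneg h0i).symm
    obtain ⟨hq, hqmin⟩ := PySem.Chars.find_spec h0i
    rw [← hi0def] at hq
    have hi02 : i0 + 2 ≤ p.length := by
      have := hq.length_le
      simp [List.length_drop] at this
      omega
    obtain ⟨ha, hb⟩ := (pv_prefix_drop_pair _ _ _ _).mp hq
    have hs : PySem.Chars.find (p ++ ')' :: r) [']', '('] = ((i0 : Nat) : Int) := by
      apply pv_find_eq_of_min
      · rw [pv_prefix_drop_pair]
        constructor
        · rw [List.getElem?_append_left (by omega)]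
          exact ha
        · rw [List.getElem?_append_left (by omega)]
          exact hb
      · intro j hj hjj
        obtain ⟨hj1, hj2⟩ := (pv_prefix_drop_pair _ _ _ _).mp hjj
        rw [List.getElem?_append_left (by omega)] at hj1
        rw [List.getElem?_append_left (by omega)] at hj2
        exact hqmin j (by omega) ((pv_prefix_drop_pair _ _ _ _).mpr ⟨hj1, hj2⟩)
    have hdx : (p ++ ')' :: r).drop (i0 + 2) = p.drop (i0 + 2) ++ ')' :: r :=
      List.drop_append_of_le_length hi02
    have hfind2 : PySem.Chars.find (p.drop (i0 + 2) ++ ')' :: r) [')']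
        = ((p.length - (i0 + 2) : Nat) : Int) := by
      apply pv_find_eq_of_min
      · rw [pv_prefix_drop_single]
        rw [show p.length - (i0 + 2) = (p.drop (i0 + 2)).length from by simp]
        simp
      · intro k hk
        rw [pv_prefix_drop_single]
        intro hkk
        rw [List.getElem?_append_left (by simp; omega)] at hkk
        exact hp (List.mem_of_mem_drop (List.mem_of_getElem? hkk))
    have htake : (p.drop (i0 + 2) ++ ')' :: r).take (p.length - (i0 + 2)) = p.drop (i0 + 2) :=
      List.take_left' (by simp)
    have hrec : (p.drop (i0 + 2) ++ ')' :: r).drop ((p.length - (i0 + 2)) + 1) = r := by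
      rw [show p.length - (i0 + 2) + 1 = (p.drop (i0 + 2)).length + 1 + 0 from by simp, pv_drop_shift,
        List.drop_zero]
    have hsegB : pvSegB p num =
        (if PySem.Chars.startswith (p.drop (i0 + 2)) "http://".toList
            || PySem.Chars.startswith (p.drop (i0 + 2)) "https://".toList
            || PySem.Chars.startswith (p.drop (i0 + 2)) "#".toList then []
         else [(String.ofList (p.drop (i0 + 2)), num)]) := by
      rw [pvSegB]
      simp only [hi0]
      rw [if_neg (by omega)]
      have hc2 : ((i0 : Nat) : Int) + 2 = ((i0 + 2 : Nat) : Int) := by push_cast; ring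
      rw [hc2, PySem.List.slice_from_natCast]
    conv_lhs => rw [pvScan]
    rw [dif_neg (show ¬PySem.Chars.find (p ++ ')' :: r) [']', '('] = -1 from by
      rw [hs]
      have := Int.natCast_nonneg i0
      omega)]
    simp only [hs, Int.toNat_natCast, hdx, hfind2]
    rw [dif_neg (show ¬((p.length - (i0 + 2) : Nat) : Int) = -1 from by
      have := Int.natCast_nonneg (p.length - (i0 + 2))
      omega)]
    simp only [htake, hrec, hsegB]

lemma pvScan_eq_flat (num : Int) :
    ∀ (n : Nat) (cs : List Char), cs.length ≤ n →
      pvScan num cs = ((pvSplitC ')' cs).dropLast).flatMap (fun piece => pvSegB piece num) := by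
  intro n
  induction n with
  | zero =>
    intro cs hlen
    have : cs = [] := List.eq_nil_of_length_eq_zero (by omega)
    subst this
    rw [pvScan, dif_pos (by decide)]
    simp [pvSplitC]
  | succ n ih =>
    intro cs hlen
    by_cases hc : (')' : Char) ∈ cs
    · obtain ⟨p, r, hcs, hpmem⟩ := pv_split_at_first ')' cs hc
      subst hcs
      rw [pvSplitC_append _ _ _ hpmem, List.dropLast_cons_of_ne_nil (pvSplitC_ne_nil _ _),
        List.flatMap_cons, pvScan_append num p r hpmem,
        ih r (by simp at hlen; omega)]
    · rw [pvSplitC_no_sep _ _ hc]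
      simp only [List.dropLast_singleton, List.flatMap_nil]
      by_cases hf : PySem.Chars.find cs [']', '('] = -1
      · rw [pvScan, dif_pos hf]
      · rw [pvScan, dif_neg hf]
        have hfu : PySem.Chars.find (cs.drop ((PySem.Chars.find cs [']', '(']).toNat + 2)) [')'] = -1 := by
          apply pv_find_eq_neg_one
          intro j hj
          rw [pv_prefix_drop_single] at hj
          exact hc (List.mem_of_mem_drop (List.mem_of_getElem? hj))
        rw [dif_pos hfu]

-- ===== VERDICT (by name: the statement is the Claim_ definition above) =====
theorem extract_doc_links_spec : Claim_equal_extract_doc_links := by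
  intro content _
  unfold Spec_extract_doc_links extract_doc_links extract_doc_links_alt
  generalize (PySem.Chars.splitOn content.toList ['\n']) = lines
  have hline : ∀ (num : Int) (line : List Char),
      pvLineA line num 0 =
        (PySem.List.slice (PySem.Chars.splitOn line [')']) none (some (-1))).foldl
          (fun links piece => links ++ pvSegB piece num) [] := by
    intro num line
    rw [PySem.List.slice_to_neg_one, PySem.List.foldl_append_eq_flatMap, List.nil_append,
      pvSplitOn_eq, pvLineA_eq_scan line num line.length 0 (by omega), List.drop_zero,
      pvScan_eq_flat num line.length line rfl.le]
  have hfun : (fun (links : List (String × Int)) (p : Int × List Char) => links ++ pvLineA p.2 p.1 0)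
      = (fun links p =>
          (PySem.List.slice (PySem.Chars.splitOn p.2 [')']) none (some (-1))).foldl
            (fun links piece => links ++ pvSegB piece p.1) links) := by
    funext links p
    rw [hline p.1 p.2, PySem.List.slice_to_neg_one,
      PySem.List.foldl_append_eq_flatMap, PySem.List.foldl_append_eq_flatMap, List.nil_append]
  rw [hfun]
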